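-- pv_equiv track=rewrite | github.com/rkorv/tglang | ml/utils/preprocess.py | replace_continuous_with_N
-- ===== SOURCE A (Python) =====
-- def replace_continuous_with_N(nums, range_start, N):
--     i = 0
--     new_list = []
--     while i < len(nums):
--         if range_start <= nums[i]:
--             new_list.append(N)
--             while i < len(nums) and range_start <= nums[i]:
--                 i += 1
--         else:
--             new_list.append(nums[i])
--             i += 1
--     return new_list
-- ===== SOURCE B (Python) =====
-- def replace_continuous_with_N(nums, range_start, N):
--     # Two passes: first group the list into maximal runs of elements sharing the
--     # key (range_start <= x), then map each run: a high run becomes a single N,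
--     # a low run is kept verbatim.
--     runs = []
--     for x in nums:
--         k = range_start <= x
--         if runs and runs[-1][0] == k:
--             runs[-1][1].append(x)
--         else:
--             runs.append((k, [x]))
--     out = []
--     for k, g in runs:
--         if k:
--             out.append(N)
--         else:
--             out.extend(g)
--     return out
-- ===== Notes on version B (the rewrite author's own statement) =====
-- stated objective: alternative
-- what changed: Replaced A's index-cursor while-loop (with a nested skip-loop only for high elements) by a two-pass run formation: first group the list into maximal same-key runs, then map each run to [N] or itself.
import Mathlib
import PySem

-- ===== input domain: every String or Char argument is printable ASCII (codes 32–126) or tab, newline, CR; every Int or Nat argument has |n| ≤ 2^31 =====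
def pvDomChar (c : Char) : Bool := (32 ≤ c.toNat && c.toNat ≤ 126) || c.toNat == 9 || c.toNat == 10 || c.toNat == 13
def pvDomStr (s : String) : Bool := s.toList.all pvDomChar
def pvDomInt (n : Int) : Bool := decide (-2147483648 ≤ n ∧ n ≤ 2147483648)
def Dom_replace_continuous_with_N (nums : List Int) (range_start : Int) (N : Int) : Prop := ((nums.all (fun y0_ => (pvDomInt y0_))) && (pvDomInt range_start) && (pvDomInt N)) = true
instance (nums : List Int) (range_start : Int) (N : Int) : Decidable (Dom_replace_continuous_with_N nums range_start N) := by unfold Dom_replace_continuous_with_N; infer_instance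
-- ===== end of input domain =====

-- B replaces A's index-cursor while-loop by a two-pass run formation (group the
-- list into maximal same-key runs, then map each run); same O(n) cost, alternative structure.

-- ===== PORT A =====
-- inner 'while i < len(nums) and range_start <= nums[i]: i += 1' (short-circuit 'and' = nested if;
-- structural fuel recursion: the loop runs at most nums.length - i times, fuel = nums.length suffices)
def skipHigh (nums : List Int) (range_start : Int) : Nat → Nat → Nat
  | 0, i => i
  | fuel+1, i =>
    if h : i < nums.length then
      if range_start ≤ nums[i] then skipHigh nums range_start fuel (i+1) else i
    else i

-- outer while loop of A (same fuel discipline)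
def loopA (nums : List Int) (range_start : Int) (N : Int) : Nat → Nat → List Int → List Int
  | 0, _, new_list => new_list
  | fuel+1, i, new_list =>
    if h : i < nums.length then
      if range_start ≤ nums[i] then
        loopA nums range_start N fuel (skipHigh nums range_start nums.length i) (new_list ++ [N])
      else
        loopA nums range_start N fuel (i+1) (new_list ++ [nums[i]])
    else new_list

def replace_continuous_with_N (nums : List Int) (range_start : Int) (N : Int) : List Int :=
  loopA nums range_start N nums.length 0 []

-- ===== PORT B =====
-- one step of B's first pass: extend the last run or start a new one
def runStep (range_start : Int) (runs : List (Bool × List Int)) (x : Int) : List (Bool × List Int) :=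
  let k := decide (range_start ≤ x)
  match runs.getLast? with
  | some (k', g) => if k' == k then runs.dropLast ++ [(k', g ++ [x])] else runs ++ [(k, [x])]
  | none => runs ++ [(k, [x])]

def replace_continuous_with_N_alt (nums : List Int) (range_start : Int) (N : Int) : List Int :=
  let runs := nums.foldl (runStep range_start) []
  runs.foldl (fun out kg => if kg.1 then out ++ [N] else out ++ kg.2) []

-- ===== PRECONDITION & SPEC =====
def Spec_replace_continuous_with_N (nums : List Int) (range_start : Int) (N : Int) (out : List Int) : Prop := out = replace_continuous_with_N_alt nums range_start N
instance (nums : List Int) (range_start : Int) (N : Int) (out : List Int) : Decidable (Spec_replace_continuous_with_N nums range_start N out) := by unfold Spec_replace_continuous_with_N; infer_instance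

-- ===== CLAIM (what is proved, stated in full; the proofs are below) =====
def Claim_equal_replace_continuous_with_N : Prop := ∀ (nums : List Int) (range_start : Int) (N : Int), Dom_replace_continuous_with_N nums range_start N → Spec_replace_continuous_with_N nums range_start N (replace_continuous_with_N nums range_start N)

-- ===== LEMMAS AND PROOFS =====

-- common reference spec: peel one maximal run at a time
def specF (range_start : Int) (N : Int) : List Int → List Int
  | [] => []
  | x :: xs =>
    if range_start ≤ x then
      N :: specF range_start N (xs.dropWhile (fun y => decide (range_start ≤ y)))
    else x :: specF range_start N xs
termination_by l => l.length
decreasing_by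
  · simp only [List.length_cons]
    exact Nat.lt_succ_of_le (List.length_dropWhile_le _ _)
  · simp

theorem specF_cons (range_start N x : Int) (xs : List Int) :
    specF range_start N (x :: xs) =
      if range_start ≤ x then
        N :: specF range_start N (xs.dropWhile (fun y => decide (range_start ≤ y)))
      else x :: specF range_start N xs := by
  rw [specF]

-- span-based run formation, reference form of B's first pass
def runsRec (range_start : Int) : List Int → List (Bool × List Int)
  | [] => []
  | x :: xs =>
    let k := decide (range_start ≤ x)
    (k, x :: xs.takeWhile (fun y => decide (range_start ≤ y) == k)) ::
      runsRec range_start (xs.dropWhile (fun y => decide (range_start ≤ y) == k))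
termination_by l => l.length
decreasing_by
  · simp only [List.length_cons]
    exact Nat.lt_succ_of_le (List.length_dropWhile_le _ _)

theorem runsRec_cons (range_start x : Int) (xs : List Int) :
    runsRec range_start (x :: xs) =
      (decide (range_start ≤ x),
        x :: xs.takeWhile (fun y => decide (range_start ≤ y) == decide (range_start ≤ x))) ::
        runsRec range_start
          (xs.dropWhile (fun y => decide (range_start ≤ y) == decide (range_start ≤ x))) := by
  rw [runsRec]

theorem foldl_runStep (range_start : Int) (l : List Int) :
    ∀ (R : List (Bool × List Int)) (k : Bool) (g : List Int),
    l.foldl (runStep range_start) (R ++ [(k, g)]) =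
      R ++ [(k, g ++ l.takeWhile (fun y => decide (range_start ≤ y) == k))] ++
        runsRec range_start (l.dropWhile (fun y => decide (range_start ≤ y) == k)) := by
  induction l with
  | nil => intro R k g; simp [runsRec]
  | cons x xs ih =>
    intro R k g
    by_cases hk : (decide (range_start ≤ x) == k) = true
    · have hk' : k = decide (range_start ≤ x) := (eq_of_beq hk).symm
      have hstep : runStep range_start (R ++ [(k, g)]) x = R ++ [(k, g ++ [x])] := by
        simp [runStep, hk']
      simp only [List.foldl_cons, hstep, ih]
      rw [List.takeWhile_cons_of_pos (p := fun y => decide (range_start ≤ y) == k) (l := xs) hk,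
        List.dropWhile_cons_of_pos (p := fun y => decide (range_start ≤ y) == k) (l := xs) hk]
      simp
    · have hkf : (decide (range_start ≤ x) == k) = false := by simpa using hk
      have hkf' : (k == decide (range_start ≤ x)) = false := by rw [BEq.comm]; exact hkf
      have hstep : runStep range_start (R ++ [(k, g)]) x =
          (R ++ [(k, g)]) ++ [(decide (range_start ≤ x), [x])] := by
        simp [runStep, hkf']
      simp only [List.foldl_cons, hstep, ih]
      rw [List.takeWhile_cons_of_neg (p := fun y => decide (range_start ≤ y) == k) (l := xs) hk,
        List.dropWhile_cons_of_neg (p := fun y => decide (range_start ≤ y) == k) (l := xs) hk, runsRec_cons]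
      simp
  
theorem buildRuns_eq (range_start : Int) (nums : List Int) :
    nums.foldl (runStep range_start) [] = runsRec range_start nums := by
  cases nums with
  | nil => simp [runsRec]
  | cons x xs =>
    have h1 : runStep range_start [] x = [] ++ [(decide (range_start ≤ x), [x])] := by
      simp [runStep]
    simp only [List.foldl_cons, h1, foldl_runStep]
    rw [runsRec_cons]
    simp

theorem foldl_render (N : Int) (runs : List (Bool × List Int)) :
    ∀ acc, runs.foldl (fun out kg => if kg.1 then out ++ [N] else out ++ kg.2) acc =
      acc ++ runs.flatMap (fun kg => if kg.1 then [N] else kg.2) := by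
  induction runs with
  | nil => simp
  | cons r rs ih =>
    intro acc
    by_cases h : r.1 = true <;> simp [ih, h]

theorem specF_low_prefix (range_start N : Int) (gs : List Int)
    (h : ∀ y ∈ gs, ¬ range_start ≤ y) (t : List Int) :
    specF range_start N (gs ++ t) = gs ++ specF range_start N t := by
  induction gs with
  | nil => simp
  | cons y ys ih =>
    have hy : ¬ range_start ≤ y := h y (by simp)
    rw [List.cons_append, specF_cons, if_neg hy]
    simp only [List.cons_append, List.cons.injEq, true_and]
    exact ih (fun z hz => h z (by simp [hz]))

theorem flatMap_runsRec (range_start N : Int) (l : List Int) :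
    (runsRec range_start l).flatMap (fun kg => if kg.1 then [N] else kg.2) =
      specF range_start N l := by
  match l with
  | [] => simp [runsRec, specF]
  | x :: xs =>
    rw [runsRec_cons, List.flatMap_cons]
    by_cases hx : range_start ≤ x
    · have hk : decide (range_start ≤ x) = true := by simpa using hx
      have hfun : (fun y => decide (range_start ≤ y) == decide (range_start ≤ x)) =
          (fun y => decide (range_start ≤ y)) := by
        funext y; rw [hk]; simp
      rw [hfun, if_pos (by simpa using hk)]
      rw [flatMap_runsRec range_start N (xs.dropWhile (fun y => decide (range_start ≤ y)))]
      rw [specF_cons, if_pos hx]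
      simp
    · have hk : decide (range_start ≤ x) = false := by simpa using hx
      have hfun : (fun y => decide (range_start ≤ y) == decide (range_start ≤ x)) =
          (fun y => decide (range_start ≤ y) == false) := by
        funext y; rw [hk]
      rw [hfun, if_neg (by simp [hk])]
      rw [flatMap_runsRec range_start N (xs.dropWhile (fun y => decide (range_start ≤ y) == false))]
      rw [specF_cons, if_neg hx]
      have hmem : ∀ y ∈ xs.takeWhile (fun y => decide (range_start ≤ y) == false), ¬ range_start ≤ y := by
        intro y hy
        have := List.mem_takeWhile_imp hy
        simpa using this
      calc (x :: xs.takeWhile (fun y => decide (range_start ≤ y) == false)) ++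
            specF range_start N (xs.dropWhile (fun y => decide (range_start ≤ y) == false))
          = x :: (xs.takeWhile (fun y => decide (range_start ≤ y) == false) ++
            specF range_start N (xs.dropWhile (fun y => decide (range_start ≤ y) == false))) := by simp
        _ = x :: specF range_start N (xs.takeWhile (fun y => decide (range_start ≤ y) == false) ++
            xs.dropWhile (fun y => decide (range_start ≤ y) == false)) := by
            rw [specF_low_prefix range_start N _ hmem]
        _ = x :: specF range_start N xs := by rw [List.takeWhile_append_dropWhile]
termination_by l.length
decreasing_by
  · simp only [List.length_cons]
    exact Nat.lt_succ_of_le (List.length_dropWhile_le _ _)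
  · simp only [List.length_cons]
    exact Nat.lt_succ_of_le (List.length_dropWhile_le _ _)

theorem alt_eq_specF (nums : List Int) (range_start N : Int) :
    replace_continuous_with_N_alt nums range_start N = specF range_start N nums := by
  unfold replace_continuous_with_N_alt
  rw [buildRuns_eq, foldl_render, List.nil_append, flatMap_runsRec]

-- A side
theorem skipHigh_ge (nums : List Int) (range_start : Int) (fuel i : Nat) :
    i ≤ skipHigh nums range_start fuel i := by
  induction fuel generalizing i with
  | zero => exact Nat.le_refl i
  | succ fuel ih =>
    rw [skipHigh]
    split
    · split
      · exact Nat.le_trans (Nat.le_succ i) (ih (i+1))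
      · exact Nat.le_refl i
    · exact Nat.le_refl i

theorem skipHigh_succ_le (nums : List Int) (range_start : Int) (fuel i : Nat)
    (h : i < nums.length) (hc : range_start ≤ nums[i]) :
    i + 1 ≤ skipHigh nums range_start (fuel+1) i := by
  rw [skipHigh, dif_pos h, if_pos hc]
  exact skipHigh_ge nums range_start fuel (i+1)

theorem skipHigh_drop (nums : List Int) (range_start : Int) (fuel : Nat) :
    ∀ i, nums.length ≤ i + fuel →
      nums.drop (skipHigh nums range_start fuel i) =
        (nums.drop i).dropWhile (fun y => decide (range_start ≤ y)) := by
  induction fuel with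
  | zero =>
    intro i hf
    rw [skipHigh, List.drop_eq_nil_of_le (by omega)]
    simp
  | succ fuel ih =>
    intro i hf
    rw [skipHigh]
    split
    · rename_i h
      split
      · rename_i hc
        rw [ih (i+1) (by omega)]
        rw [List.drop_eq_getElem_cons h, List.dropWhile_cons_of_pos (by simpa using hc)]
      · rename_i hc
        rw [List.drop_eq_getElem_cons h, List.dropWhile_cons_of_neg (by simpa using hc)]
    · rename_i h
      rw [List.drop_eq_nil_of_le (by omega)]
      simp

theorem loopA_eq (nums : List Int) (range_start N : Int) (fuel : Nat) :
    ∀ i acc, nums.length ≤ i + fuel →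
      loopA nums range_start N fuel i acc = acc ++ specF range_start N (nums.drop i) := by
  induction fuel with
  | zero =>
    intro i acc hf
    rw [loopA, List.drop_eq_nil_of_le (by omega)]
    simp [specF]
  | succ fuel ih =>
    intro i acc hf
    rw [loopA]
    split
    · rename_i h
      rw [List.drop_eq_getElem_cons h, specF_cons]
      split
      · rename_i hc
        have hskip : i + 1 ≤ skipHigh nums range_start nums.length i := by
          obtain ⟨m, hm⟩ : ∃ m, nums.length = m + 1 := ⟨nums.length - 1, by omega⟩
          rw [hm]
          exact skipHigh_succ_le nums range_start m i h hc
        rw [ih (skipHigh nums range_start nums.length i) (acc ++ [N]) (by omega)]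
        rw [skipHigh_drop nums range_start nums.length i (by omega)]
        rw [List.drop_eq_getElem_cons h, List.dropWhile_cons_of_pos (by simpa using hc)]
        simp
      · rename_i hc
        rw [ih (i+1) (acc ++ [nums[i]]) (by omega)]
        simp
    · rename_i h
      rw [List.drop_eq_nil_of_le (by omega)]
      simp [specF]

-- ===== VERDICT (by name: the statement is the Claim_ definition above) =====
theorem replace_continuous_with_N_spec : Claim_equal_replace_continuous_with_N := by
  intro nums range_start N _
  unfold Spec_replace_continuous_with_N
  rw [alt_eq_specF]
  unfold replace_continuous_with_N
  rw [loopA_eq nums range_start N nums.length 0 [] (by omega)]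
  simp
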